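-- pv_equiv track=rewrite | github.com/Nekitori17/Program-Exercise-Next | 39_Day_con/B39.py | day_con
-- ===== SOURCE A (Python) =====
-- def day_con(day_chinh: list[int]) -> tuple[int, int]:
--   day_chinh.sort()
--   tong_le = 0
--   for x in day_chinh:
--     if x > 0 and x % 2 != 0:
--       tong_le += x
--
--   tong_day_con_co_buoc = []
--   for step in range(2, day_chinh[-1]):
--     cac_so = []
--     for x in day_chinh:
--       if x % step == 0:
--         cac_so.append(x)
--     tong_day_con_co_buoc.append(len(cac_so))
--
--   return tong_le, max(tong_day_con_co_buoc)
-- ===== SOURCE B (Python) =====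
-- def _uoc(v):
--     # all positive divisors of v >= 1, found in O(sqrt(v))
--     ds = []
--     d = 1
--     while d * d <= v:
--         if v % d == 0:
--             ds.append(d)
--             e = v // d
--             if e != d:
--                 ds.append(e)
--         d += 1
--     return ds
--
--
-- def day_con(day_chinh: list[int]) -> tuple[int, int]:
--     m = max(day_chinh)
--     tong_le = 0
--     for x in day_chinh:
--         if x > 0 and x % 2 != 0:
--             tong_le += x
--     zeros = 0
--     cnt = {}
--     for x in day_chinh:
--         v = x if x >= 0 else -x
--         if v == 0:
--             zeros += 1
--         else:
--             for e in _uoc(v):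
--                 cnt[e] = cnt.get(e, 0) + 1
--     best = 0
--     for step in range(2, m):
--         c = cnt.get(step, 0) + zeros
--         if c > best:
--             best = c
--     return tong_le, best
-- ===== Notes on version B (the rewrite author's own statement) =====
-- stated objective: faster
-- what changed: Instead of scanning the whole list once per step in range(2, max) (O(max*n)), B enumerates the divisors of each |x| once in O(sqrt|x|), accumulates a divisor->count table, and answers each step by one table lookup plus the count of zeros.
-- outside the precondition, e.g. on day_con([]): A raises IndexError, B raises ValueError; on day_con([1, 2]): A raises ValueError, B returns (1, 0)
import Mathlib
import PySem

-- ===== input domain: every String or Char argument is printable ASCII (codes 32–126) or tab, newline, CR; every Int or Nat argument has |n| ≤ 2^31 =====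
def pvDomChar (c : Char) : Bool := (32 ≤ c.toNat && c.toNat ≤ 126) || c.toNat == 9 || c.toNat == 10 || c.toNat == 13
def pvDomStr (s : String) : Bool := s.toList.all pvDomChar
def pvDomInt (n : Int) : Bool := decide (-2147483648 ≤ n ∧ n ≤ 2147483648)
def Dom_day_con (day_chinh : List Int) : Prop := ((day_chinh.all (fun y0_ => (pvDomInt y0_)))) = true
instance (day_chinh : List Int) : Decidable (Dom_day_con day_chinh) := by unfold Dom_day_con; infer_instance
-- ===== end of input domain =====

-- B replaces A's per-step scan of the whole list by one divisor-table pass (divisor enumeration in O(sqrt|x|) per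
-- element) plus a lookup per step; equivalence is about the RETURN value only — A sorts its argument in place, B does not.


-- ===== PORT A =====
def day_con (day_chinh : List Int) : Int × Int :=
  let sortedl := PySem.List.sorted day_chinh (fun x => x) false
  let tong_le := sortedl.foldl
    (fun acc x => if 0 < x ∧ PySem.Int.mod x 2 ≠ 0 then acc + x else acc) 0
  let tong_day := (PySem.List.pyRange 2 ((PySem.List.pyGet? sortedl (-1)).getD 0)).foldl
    (fun acc step =>
      acc ++ [((sortedl.foldl
        (fun cs x => if PySem.Int.mod x step = 0 then cs ++ [x] else cs) []).length : Int)]) []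
  (tong_le, (PySem.List.max? tong_day (fun y => y)).getD 0)

-- ===== PORT B =====
-- the 'while d*d <= v' loop of _uoc, made total with a fuel counter (fuel ≥ number of iterations left)
def uocAux (v : Int) : Nat → Int → List Int
  | 0, _ => []
  | fuel + 1, d =>
      if d * d ≤ v then
        (if PySem.Int.mod v d = 0 then
           [d] ++ (if PySem.Int.floordiv v d ≠ d then [PySem.Int.floordiv v d] else [])
         else []) ++ uocAux v fuel (d + 1)
      else []

def uoc (v : Int) : List Int := uocAux v (v.toNat + 1) 1

def day_con_alt (day_chinh : List Int) : Int × Int :=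
  let m := (PySem.List.max? day_chinh (fun y => y)).getD 0
  let tong_le := day_chinh.foldl
    (fun acc x => if 0 < x ∧ PySem.Int.mod x 2 ≠ 0 then acc + x else acc) 0
  let zc := day_chinh.foldl
    (fun (s : Int × PySem.Dict Int Int) x =>
      let v := if 0 ≤ x then x else -x
      if v = 0 then (s.1 + 1, s.2)
      else (s.1, (uoc v).foldl (fun d e => d.modify e 0 (· + 1)) s.2))
    (0, PySem.Dict.empty)
  let best := (PySem.List.pyRange 2 m).foldl
    (fun b step =>
      let c := zc.2.getD step 0 + zc.1
      if c > b then c else b) 0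
  (tong_le, best)

-- ===== PRECONDITION & SPEC =====
-- Pre_ excludes exactly the inputs on which A raises: the empty list (IndexError) and lists whose
-- maximum is ≤ 2 (range(2, max) is then empty and max([]) raises ValueError).
def Pre_day_con (day_chinh : List Int) : Prop := ∃ x ∈ day_chinh, 2 < x
instance (day_chinh : List Int) : Decidable (Pre_day_con day_chinh) := by unfold Pre_day_con; infer_instance
def pvWitness_day_con : List Int := [1, 4, 3]

def Spec_day_con (day_chinh : List Int) (out : Int × Int) : Prop := out = day_con_alt day_chinh
instance (day_chinh : List Int) (out : Int × Int) : Decidable (Spec_day_con day_chinh out) := by unfold Spec_day_con; infer_instance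

-- ===== CLAIM (what is proved, stated in full; the proofs are below) =====
def Claim_equal_day_con : Prop := ∀ (day_chinh : List Int), Dom_day_con day_chinh → Pre_day_con day_chinh → Spec_day_con day_chinh (day_con day_chinh)

-- ===== LEMMAS AND PROOFS =====

-- the divisor condition at loop counter k ('abbrev' so Decidable is found by unfolding)
abbrev UocCond (v k s : Int) : Prop := s ∣ v ∧ ((k ≤ s ∧ s * s ≤ v) ∨ (v < s * s ∧ k ≤ v / s))

lemma divisor_pos (v s : Int) (hv : 1 ≤ v) (hd : s ∣ v) (hq : 1 ≤ v / s) : 0 < s := by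
  by_contra hs0
  push_neg at hs0
  have : v / s ≤ 0 := Int.ediv_nonpos_of_nonneg_of_nonpos (by omega) hs0
  omega

lemma uocCond_false (v k s : Int) (hv : 1 ≤ v) (hk : 1 ≤ k) (hstop : v < k * k) :
    ¬ UocCond v k s := by
  rintro ⟨hdvd, ⟨h1, h2⟩ | ⟨hlt, hke⟩⟩
  · nlinarith
  · have hs : 0 < s := divisor_pos v s hv hdvd (by omega)
    have heq : s * (v / s) = v := Int.mul_ediv_cancel' hdvd
    have he1 : v / s < s := by nlinarith
    have he2 : k * k ≤ (v / s) * (v / s) := by nlinarith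
    nlinarith

lemma count_uocAux (fuel : Nat) : ∀ (v k s : Int), 1 ≤ v → 1 ≤ k → (v + 1 - k).toNat ≤ fuel →
    (uocAux v fuel k).count s = if UocCond v k s then 1 else 0 := by
  induction fuel with
  | zero =>
    intro v k s hv hk hfuel
    have hk1 : v + 1 ≤ k := by omega
    have hstop : v < k * k := by nlinarith
    simp [uocAux, uocCond_false v k s hv hk hstop]
  | succ fuel ih =>
    intro v k s hv hk hfuel
    by_cases hloop : k * k ≤ v
    · have hkv : k ≤ v := by nlinarith
      have hrec := ih v (k + 1) s hv (by omega) (by omega)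
      simp only [uocAux, if_pos hloop, List.count_append, hrec,
        PySem.Int.floordiv_eq_ediv_of_pos (show (0:Int) < k by omega)]
      by_cases hdvd : k ∣ v
      · have hmod : PySem.Int.mod v k = 0 := (PySem.Int.mod_eq_zero_iff_dvd v k).mpr hdvd
        have hq : k * (v / k) = v := Int.mul_ediv_cancel' hdvd
        have hkq : k ≤ v / k := by nlinarith
        have hqd : (v / k) ∣ v := ⟨k, by linarith [mul_comm k (v / k)]⟩
        rw [if_pos hmod]
        by_cases hsk : s = k
        · subst hsk
          have hget : (([s] ++ if v / s ≠ s then [v / s] else []) : List Int).count s = 1 := by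
            by_cases hqk : v / s ≠ s
            · rw [if_pos hqk]
              simp [List.count_cons, List.count_nil, hqk]
            · rw [if_neg hqk]
              simp [List.count_cons, List.count_nil]
          rw [hget, if_neg (show ¬ UocCond v (s + 1) s by
                rintro ⟨_, ⟨h1, _⟩ | ⟨h2, _⟩⟩
                · omega
                · linarith),
              if_pos (show UocCond v s s from ⟨hdvd, Or.inl ⟨le_refl s, hloop⟩⟩)]
        · by_cases hsq : s = v / k
          · subst hsq
            have hqk : v / k ≠ k := hsk
            have hget : (([k] ++ if v / k ≠ k then [v / k] else []) : List Int).count (v / k) = 1 := by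
              rw [if_pos hqk]
              simp [List.count_cons, List.count_nil, Ne.symm hqk]
            have hvq : v / (v / k) = k := by
              have h0 : v / k ≠ 0 := fun h0 => by rw [h0] at hkq; omega
              calc v / (v / k) = (k * (v / k)) / (v / k) := by rw [hq]
                _ = k := Int.mul_ediv_cancel k h0
            have hkq1 : k + 1 ≤ v / k := Int.add_one_le_iff.mpr (lt_of_le_of_ne hkq (Ne.symm hqk))
            rw [hget,
              if_neg (show ¬ UocCond v (k + 1) (v / k) by
                rintro ⟨_, ⟨h1, h2⟩ | ⟨_, h4⟩⟩
                · nlinarith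
                · rw [hvq] at h4; omega),
              if_pos (show UocCond v k (v / k) from
                ⟨hqd, Or.inr ⟨by nlinarith, by rw [hvq]⟩⟩)]
          · have hget : (([k] ++ if v / k ≠ k then [v / k] else []) : List Int).count s = 0 := by
              by_cases hqk : v / k ≠ k
              · rw [if_pos hqk]
                simp [List.count_cons, List.count_nil, Ne.symm hsk, Ne.symm hsq]
              · rw [if_neg hqk]
                simp [List.count_cons, List.count_nil, Ne.symm hsk]
            have hiff : UocCond v (k + 1) s ↔ UocCond v k s := by
              constructor
              · rintro ⟨hd, ⟨h1, h2⟩ | ⟨h3, h4⟩⟩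
                · exact ⟨hd, Or.inl ⟨by omega, h2⟩⟩
                · exact ⟨hd, Or.inr ⟨h3, by omega⟩⟩
              · rintro ⟨hd, ⟨h1, h2⟩ | ⟨h3, h4⟩⟩
                · exact ⟨hd, Or.inl ⟨by omega, h2⟩⟩
                · refine ⟨hd, Or.inr ⟨h3, ?_⟩⟩
                  have hne : v / s ≠ k := by
                    intro heq
                    have hs0 : 0 < s := divisor_pos v s hv hd (by omega)
                    have hsv : s * (v / s) = v := Int.mul_ediv_cancel' hd
                    rw [heq] at hsv
                    have hks : k * s = k * (v / k) := by
                      rw [hq]; linarith [mul_comm s k]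
                    exact hsq (mul_left_cancel₀ (show (k:Int) ≠ 0 by omega) hks)
                  omega
            rw [hget, if_congr hiff rfl rfl]
            omega
      · have hmod : ¬ PySem.Int.mod v k = 0 :=
          fun h => hdvd ((PySem.Int.mod_eq_zero_iff_dvd v k).mp h)
        have hiff : UocCond v (k + 1) s ↔ UocCond v k s := by
          constructor
          · rintro ⟨hd, ⟨h1, h2⟩ | ⟨h3, h4⟩⟩
            · exact ⟨hd, Or.inl ⟨by omega, h2⟩⟩
            · exact ⟨hd, Or.inr ⟨h3, by omega⟩⟩
          · rintro ⟨hd, ⟨h1, h2⟩ | ⟨h3, h4⟩⟩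
            · have hsk : s ≠ k := fun h => hdvd (h ▸ hd)
              exact ⟨hd, Or.inl ⟨by omega, h2⟩⟩
            · refine ⟨hd, Or.inr ⟨h3, ?_⟩⟩
              have hne : v / s ≠ k := by
                intro heq
                have hs0 : 0 < s := divisor_pos v s hv hd (by omega)
                have hsv : s * (v / s) = v := Int.mul_ediv_cancel' hd
                rw [heq] at hsv
                exact hdvd ⟨s, by linarith [mul_comm s k]⟩
              omega
        rw [if_neg hmod, if_congr hiff rfl rfl]
        simp [List.count_nil]
    · have hstop : v < k * k := by omega
      rw [show uocAux v (fuel + 1) k = [] by simp [uocAux, hloop]]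
      simp [uocCond_false v k s hv hk hstop]

lemma count_uoc (v s : Int) (hv : 1 ≤ v) :
    (uoc v).count s = if s ∣ v ∧ 1 ≤ s then 1 else 0 := by
  rw [uoc, count_uocAux (v.toNat + 1) v 1 s hv (le_refl 1) (by omega)]
  have hiff : UocCond v 1 s ↔ (s ∣ v ∧ 1 ≤ s) := by
    constructor
    · rintro ⟨hd, ⟨h1, _⟩ | ⟨_, h4⟩⟩
      · exact ⟨hd, h1⟩
      · have hs0 := divisor_pos v s hv hd (by omega)
        exact ⟨hd, by omega⟩
    · rintro ⟨hd, hs1⟩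
      refine ⟨hd, ?_⟩
      by_cases hsq : s * s ≤ v
      · exact Or.inl ⟨hs1, hsq⟩
      · refine Or.inr ⟨by omega, ?_⟩
        have hsv : s * (v / s) = v := Int.mul_ediv_cancel' hd
        nlinarith
  rw [if_congr hiff rfl rfl]

-- proofs-only helper: B's zeros/divisor-table loop body, named for the invariant proofs (same lambda as in the port)
def Fzc : (Int × PySem.Dict Int Int) → Int → (Int × PySem.Dict Int Int) :=
  fun s x =>
    let v := if 0 ≤ x then x else -x
    if v = 0 then (s.1 + 1, s.2)
    else (s.1, (uoc v).foldl (fun d e => d.modify e 0 (· + 1)) s.2)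

lemma getD_empty (k : Int) : (PySem.Dict.empty : PySem.Dict Int Int).getD k 0 = 0 := rfl

lemma zc_fst (l : List Int) : ∀ (z : Int) (c : PySem.Dict Int Int),
    (l.foldl Fzc (z, c)).1 = z + (l.countP (fun x => decide (x = 0)) : Int) := by
  induction l with
  | nil => intro z c; simp
  | cons x t ih =>
    intro z c
    rw [List.foldl_cons, List.countP_cons]
    by_cases hx : x = 0
    · rw [show Fzc (z, c) x = (z + 1, c) by simp [Fzc, hx], ih,
          show (decide (x = 0)) = true by simp [hx]]
      simp only [if_true]
      omega
    · have hv0 : (if 0 ≤ x then x else -x) ≠ 0 := by split_ifs <;> omega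
      rw [show Fzc (z, c) x = (z, (uoc (if 0 ≤ x then x else -x)).foldl
            (fun d e => d.modify e 0 (· + 1)) c) by simp [Fzc, hv0], ih,
          show (decide (x = 0)) = false by simp [hx]]
      simp

lemma zc_getD (l : List Int) : ∀ (z : Int) (c : PySem.Dict Int Int) (s : Int), 1 ≤ s →
    (l.foldl Fzc (z, c)).2.getD s 0
      = c.getD s 0 + (l.countP (fun x => decide (x ≠ 0 ∧ s ∣ x)) : Int) := by
  induction l with
  | nil => intro z c s _; simp
  | cons x t ih =>
    intro z c s hs
    rw [List.foldl_cons, List.countP_cons]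
    by_cases hx : x = 0
    · rw [show Fzc (z, c) x = (z + 1, c) by simp [Fzc, hx], ih _ _ s hs,
          show (decide (x ≠ 0 ∧ s ∣ x)) = false by simp [hx]]
      simp
    · have hv0 : (if 0 ≤ x then x else -x) ≠ 0 := by split_ifs <;> omega
      have hv1 : 1 ≤ (if 0 ≤ x then x else -x) := by split_ifs <;> omega
      rw [show Fzc (z, c) x = (z, (uoc (if 0 ≤ x then x else -x)).foldl
            (fun d e => d.modify e 0 (· + 1)) c) by simp [Fzc, hv0], ih _ _ s hs,
          PySem.Dict.getD_foldl_modify_add_one, count_uoc _ s hv1]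
      have hdvd_iff : (s ∣ (if 0 ≤ x then x else -x)) ↔ s ∣ x := by
        split_ifs
        · exact Iff.rfl
        · exact dvd_neg
      by_cases hd : s ∣ x
      · rw [if_pos ⟨hdvd_iff.mpr hd, hs⟩,
            show (decide (x ≠ 0 ∧ s ∣ x)) = true by simp [hx, hd]]
        simp only [if_true]
        omega
      · rw [if_neg (fun hcon => hd (hdvd_iff.mp hcon.1)),
            show (decide (x ≠ 0 ∧ s ∣ x)) = false by simp [hx, hd]]
        simp

lemma countP_split (l : List Int) (s : Int) :
    l.countP (fun x => decide (x ≠ 0 ∧ s ∣ x)) + l.countP (fun x => decide (x = 0))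
      = l.countP (fun x => decide (s ∣ x)) := by
  induction l with
  | nil => simp
  | cons x t ih =>
    rw [List.countP_cons, List.countP_cons, List.countP_cons]
    have e0 : (if (false = true) then (1:Nat) else 0) = 0 := by simp
    have e1 : (if (true = true) then (1:Nat) else 0) = 1 := by simp
    by_cases hx : x = 0
    · rw [show (decide (x ≠ 0 ∧ s ∣ x)) = false by simp [hx],
          show (decide (x = 0)) = true by simp [hx],
          show (decide (s ∣ x)) = true by simp [hx], e0, e1]
      omega
    · by_cases hd : s ∣ x
      · rw [show (decide (x ≠ 0 ∧ s ∣ x)) = true by simp [hx, hd],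
            show (decide (x = 0)) = false by simp [hx],
            show (decide (s ∣ x)) = true by simp [hd], e0, e1]
        omega
      · rw [show (decide (x ≠ 0 ∧ s ∣ x)) = false by simp [hx, hd],
            show (decide (x = 0)) = false by simp [hx],
            show (decide (s ∣ x)) = false by simp [hd], e0]
        omega

lemma foldl_add_eq_sum (l : List Int) (a : Int) :
    l.foldl (fun acc x => acc + x) a = a + l.sum := by
  simpa using PySem.List.foldl_add l (fun x => x) a

lemma if_max (b c : Int) : (if c > b then c else b) = max b c := by
  rw [max_def]
  split_ifs <;> omega

-- ===== VERDICT (by name: the statement is the Claim_ definition above) =====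
theorem day_con_spec : Claim_equal_day_con := by
  unfold Claim_equal_day_con Spec_day_con
  intro l _ hpre
  obtain ⟨xw, hxw, hxw2⟩ := hpre
  have hne : l ≠ [] := by rintro rfl; simp at hxw
  -- B's maximum m
  obtain ⟨mb, hmb⟩ : ∃ mb, PySem.List.max? l (fun y => y) = some mb := by
    cases h : PySem.List.max? l (fun y => y) with
    | none => exact absurd ((PySem.List.max?_eq_none_iff l (fun y => y)).mp h) hne
    | some m => exact ⟨m, rfl⟩
  have hmb_mem : mb ∈ l := PySem.List.max?_mem hmb
  have hmb_max : ∀ y ∈ l, y ≤ mb := PySem.List.max?_isMax hmb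
  have hm3 : 3 ≤ mb := by have := hmb_max xw hxw; omega
  -- A's sorted list and its last element, which equals mb
  have hSperm : (PySem.List.sorted l (fun x => x) false).Perm l :=
    PySem.List.sorted_perm l (fun x => x) false
  have hSne : PySem.List.sorted l (fun x => x) false ≠ [] := by
    intro h
    exact hne ((h ▸ hSperm).symm.eq_nil)
  have hlast_mem : (PySem.List.sorted l (fun x => x) false).getLast hSne ∈ l :=
    hSperm.subset (List.getLast_mem hSne)
  have hlast_max : ∀ y ∈ l, y ≤ (PySem.List.sorted l (fun x => x) false).getLast hSne := by
    intro y hy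
    obtain ⟨i, hi, rfl⟩ := List.mem_iff_getElem.mp (hSperm.mem_iff.mpr hy)
    rw [List.getLast_eq_getElem]
    exact PySem.List.sorted_id_getElem_mono l (by omega) (by omega)
  have hml : (PySem.List.sorted l (fun x => x) false).getLast hSne = mb :=
    le_antisymm (hmb_max _ hlast_mem) (hlast_max mb hmb_mem)
  have hlast_eq : PySem.List.pyGet? (PySem.List.sorted l (fun x => x) false) (-1) = some mb := by
    rw [PySem.List.pyGet?_neg_one, List.getLast?_eq_some_getLast hSne, hml]
  -- unfold both programs (m on both sides becomes mb) and name B's loop body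
  simp only [day_con, day_con_alt, hlast_eq, Option.getD_some, hmb]
  rw [show (fun (s : Int × PySem.Dict Int Int) x =>
        let v := if 0 ≤ x then x else -x
        if v = 0 then (s.1 + 1, s.2)
        else (s.1, (uoc v).foldl (fun d e => d.modify e 0 (· + 1)) s.2)) = Fzc from rfl]
  simp only [Prod.mk.injEq]
  refine ⟨?_, ?_⟩
  · -- the sum of positive odd elements: both are the sum of the same filtered list, up to permutation
    rw [PySem.List.foldl_ite_eq_foldl_filter, PySem.List.foldl_ite_eq_foldl_filter,
        foldl_add_eq_sum, foldl_add_eq_sum,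
        (hSperm.filter (fun x => decide (0 < x ∧ PySem.Int.mod x 2 ≠ 0))).sum_eq]
  · -- the maximal per-step count
    rw [PySem.List.foldl_append_singleton_eq_map, List.nil_append]
    -- A's per-step count is the number of elements of l divisible by step
    rw [List.map_congr_left (l := PySem.List.pyRange 2 mb)
        (g := fun step => ((l.countP (fun x => decide (step ∣ x)) : Nat) : Int))
        (fun step hstep => by
          have hcnt : ((PySem.List.sorted l (fun x => x) false).foldl
              (fun cs x => if PySem.Int.mod x step = 0 then cs ++ [x] else cs) []).length
              = l.countP (fun x => decide (step ∣ x)) := by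
            rw [PySem.List.foldl_append_ite_eq_filter, List.nil_append,
                ← List.countP_eq_length_filter]
            exact hSperm.countP_congr
              (fun x _ => decide_eq_decide.mpr (PySem.Int.mod_eq_zero_iff_dvd x step))
          rw [hcnt])]
    -- B's per-step lookup computes the same count
    have hkey : ∀ (acc step : Int), 2 ≤ step →
        (if (l.foldl Fzc (0, PySem.Dict.empty)).2.getD step 0
              + (l.foldl Fzc (0, PySem.Dict.empty)).1 > acc
         then (l.foldl Fzc (0, PySem.Dict.empty)).2.getD step 0
              + (l.foldl Fzc (0, PySem.Dict.empty)).1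
         else acc)
        = (if ((l.countP (fun x => decide (step ∣ x)) : Nat) : Int) > acc
           then ((l.countP (fun x => decide (step ∣ x)) : Nat) : Int) else acc) := by
      intro acc step h2
      have hcast : (l.foldl Fzc (0, PySem.Dict.empty)).2.getD step 0
          + (l.foldl Fzc (0, PySem.Dict.empty)).1
          = ((l.countP (fun x => decide (step ∣ x)) : Nat) : Int) := by
        rw [zc_getD l 0 PySem.Dict.empty step (by omega), zc_fst l 0 PySem.Dict.empty,
            getD_empty, zero_add, zero_add, ← countP_split l step]
        push_cast
        ring
      rw [hcast]
    rw [PySem.List.foldl_congr_mem _ _ _ _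
        (fun acc step hstep => hkey acc step (PySem.List.mem_pyRange_one.mp hstep).1)]
    rw [PySem.List.pyRange_one_cons (show (2:Int) < mb by omega), List.map_cons,
        PySem.List.max?_id_cons, Option.getD_some, List.foldl_cons, List.foldl_map]
    rw [show (if ((l.countP (fun x => decide ((2:Int) ∣ x)) : Nat) : Int) > 0
              then ((l.countP (fun x => decide ((2:Int) ∣ x)) : Nat) : Int) else 0)
          = ((l.countP (fun x => decide ((2:Int) ∣ x)) : Nat) : Int) from by split_ifs <;> omega]
    exact PySem.List.foldl_congr_mem _ _ _ _ (fun acc step _ =>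
      (if_max acc ((l.countP (fun x => decide (step ∣ x)) : Nat) : Int)).symm)
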